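-- pv_equiv track=rewrite | github.com/bouyang/pythonCSP | DSA_book/12_chapter.py | add_until_100
-- ===== SOURCE A (Python) =====
-- def add_until_100(array):
--     if not array:
--         return 0
--
--     current = add_until_100(array[1:])
--
--     if array[0] + current > 100:
--         return current
--     else:
--         return array[0] + current
-- ===== SOURCE B (Python) =====
-- def add_until_100(array):
--     acc = 0
--     for x in reversed(array):
--         if x + acc > 100:
--             continue
--         acc = x + acc
--     return acc
-- ===== Notes on version B (the rewrite author's own statement) =====
-- stated objective: faster
-- what changed: Replaced the recursion that slices a fresh tail list at every step with a single right-to-left loop over reversed(array) carrying an accumulator.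
import Mathlib
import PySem

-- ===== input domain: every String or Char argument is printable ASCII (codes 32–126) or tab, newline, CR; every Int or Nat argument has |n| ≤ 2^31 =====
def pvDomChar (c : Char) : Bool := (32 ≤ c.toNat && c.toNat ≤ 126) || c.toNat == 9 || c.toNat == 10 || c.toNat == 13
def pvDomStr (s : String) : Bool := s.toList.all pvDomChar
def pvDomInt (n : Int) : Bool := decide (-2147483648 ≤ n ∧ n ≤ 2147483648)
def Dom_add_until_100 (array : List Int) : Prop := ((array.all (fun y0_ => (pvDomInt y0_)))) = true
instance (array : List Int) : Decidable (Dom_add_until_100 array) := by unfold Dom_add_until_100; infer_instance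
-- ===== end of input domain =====

-- B replaces A's O(n^2) tail-slicing recursion with a single O(n) right-to-left accumulator pass.


-- ===== PORT A =====
def add_until_100 (array : List Int) : Int :=
  match array with
  | [] => 0
  | x :: rest =>
    let current := add_until_100 rest
    if x + current > 100 then current else x + current

-- ===== PORT B =====
-- B: one pass over reversed(array) with an accumulator
def add_until_100_alt (array : List Int) : Int :=
  array.reverse.foldl (fun acc x => if x + acc > 100 then acc else x + acc) 0

-- ===== PRECONDITION & SPEC =====
def Spec_add_until_100 (array : List Int) (out : Int) : Prop := out = add_until_100_alt array
instance (array : List Int) (out : Int) : Decidable (Spec_add_until_100 array out) := by unfold Spec_add_until_100; infer_instance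

-- ===== CLAIM (what is proved, stated in full; the proofs are below) =====
def Claim_equal_add_until_100 : Prop := ∀ (array : List Int), Dom_add_until_100 array → Spec_add_until_100 array (add_until_100 array)

-- ===== LEMMAS AND PROOFS =====

-- ===== VERDICT (by name: the statement is the Claim_ definition above) =====
theorem add_until_100_spec : Claim_equal_add_until_100 := by
  intro array h
  clear h
  unfold Spec_add_until_100 add_until_100_alt
  rw [List.foldl_reverse]
  induction array with
  | nil => rfl
  | cons x rest ih => simp [add_until_100, ih]
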